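-- pv_equiv track=rewrite | github.com/saicgr/AIFitnessCoach | backend/api/v1/library/utils.py | derive_avoids
-- ===== SOURCE A (Python) =====
-- from typing import List, Dict, Any, Optional
--
-- def derive_avoids(name: str, body_part: str, equipment: str) -> List[str]:
--     """
--     Derive what body parts/conditions this exercise might stress.
--     Helps users with injuries filter out exercises.
--     """
--     avoids = []
--     name_lower = name.lower() if name else ""
--     bp_lower = body_part.lower() if body_part else ""
--
--     # Exercises that stress the knees
--     knee_stress = ['squat', 'lunge', 'leg press', 'leg extension', 'jump', 'step-up', 'pistol']
--     if any(kw in name_lower for kw in knee_stress) or bp_lower in ['quadriceps', 'glutes']: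
--         avoids.append('Stresses Knees')
--
--     # Exercises that stress the lower back
--     back_stress = ['deadlift', 'bent over', 'good morning', 'hyperextension', 'row', 'clean', 'snatch']
--     if any(kw in name_lower for kw in back_stress):
--         avoids.append('Stresses Lower Back')
--
--     # Exercises that stress shoulders
--     shoulder_stress = ['overhead', 'press', 'raise', 'pull-up', 'dip', 'push-up', 'fly']
--     if any(kw in name_lower for kw in shoulder_stress) or bp_lower == 'shoulders':
--         avoids.append('Stresses Shoulders')
--
--     # Exercises that stress wrists
--     wrist_stress = ['push-up', 'plank', 'handstand', 'front rack', 'wrist']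
--     if any(kw in name_lower for kw in wrist_stress):
--         avoids.append('Stresses Wrists')
--
--     # High impact on joints
--     high_impact = ['jump', 'burpee', 'box jump', 'plyometric', 'sprint', 'running']
--     if any(kw in name_lower for kw in high_impact):
--         avoids.append('High Impact')
--
--     return avoids
-- ===== SOURCE B (Python) =====
-- # Inverted index: one flat keyword->label map and a body-part->label map; collect
-- # matched labels into a set, then emit the canonical label order filtered by that set.
-- _KW_INDEX = [
--     ('squat', 'Stresses Knees'), ('lunge', 'Stresses Knees'),
--     ('leg press', 'Stresses Knees'), ('leg extension', 'Stresses Knees'),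
--     ('jump', 'Stresses Knees'), ('step-up', 'Stresses Knees'),
--     ('pistol', 'Stresses Knees'),
--     ('deadlift', 'Stresses Lower Back'), ('bent over', 'Stresses Lower Back'),
--     ('good morning', 'Stresses Lower Back'), ('hyperextension', 'Stresses Lower Back'),
--     ('row', 'Stresses Lower Back'), ('clean', 'Stresses Lower Back'),
--     ('snatch', 'Stresses Lower Back'),
--     ('overhead', 'Stresses Shoulders'), ('press', 'Stresses Shoulders'),
--     ('raise', 'Stresses Shoulders'), ('pull-up', 'Stresses Shoulders'),
--     ('dip', 'Stresses Shoulders'), ('push-up', 'Stresses Shoulders'),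
--     ('fly', 'Stresses Shoulders'),
--     ('push-up', 'Stresses Wrists'), ('plank', 'Stresses Wrists'),
--     ('handstand', 'Stresses Wrists'), ('front rack', 'Stresses Wrists'),
--     ('wrist', 'Stresses Wrists'),
--     ('jump', 'High Impact'), ('burpee', 'High Impact'), ('box jump', 'High Impact'),
--     ('plyometric', 'High Impact'), ('sprint', 'High Impact'), ('running', 'High Impact'),
-- ]
-- _BP_INDEX = [
--     ('quadriceps', 'Stresses Knees'), ('glutes', 'Stresses Knees'),
--     ('shoulders', 'Stresses Shoulders'),
-- ]
-- _ORDER = ['Stresses Knees', 'Stresses Lower Back', 'Stresses Shoulders',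
--           'Stresses Wrists', 'High Impact']
--
--
-- def derive_avoids(name, body_part, equipment):
--     nl = name.lower()
--     bl = body_part.lower()
--     hit = {lab for kw, lab in _KW_INDEX if kw in nl}
--     hit.update(lab for bp, lab in _BP_INDEX if bp == bl)
--     return [lab for lab in _ORDER if lab in hit]
-- ===== Notes on version B (the rewrite author's own statement) =====
-- stated objective: alternative
-- what changed: Replaced the five per-label if/append blocks with an inverted flat keyword->label index and body-part->label index scanned once into a set of matched labels, then the canonical label order is filtered by set membership.
import Mathlib
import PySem

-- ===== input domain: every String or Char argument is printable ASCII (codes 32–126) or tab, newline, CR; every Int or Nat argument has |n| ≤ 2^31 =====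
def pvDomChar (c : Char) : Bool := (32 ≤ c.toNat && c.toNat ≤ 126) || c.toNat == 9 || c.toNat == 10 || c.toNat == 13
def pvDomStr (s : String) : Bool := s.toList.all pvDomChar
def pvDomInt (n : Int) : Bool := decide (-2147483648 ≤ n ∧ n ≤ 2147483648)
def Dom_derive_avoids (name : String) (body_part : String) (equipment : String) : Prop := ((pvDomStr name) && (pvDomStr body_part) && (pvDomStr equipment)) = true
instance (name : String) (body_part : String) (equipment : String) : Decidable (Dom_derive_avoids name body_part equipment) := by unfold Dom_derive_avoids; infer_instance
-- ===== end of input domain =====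

-- B replaces A's five per-label if/append blocks by an inverted keyword->label index collected
-- into a set of matched labels, then filters the canonical label order by that set (objective: alternative).

-- ===== PORT A =====
def derive_avoids (name : String) (body_part : String) (equipment : String) : List String :=
  let avoids : List String := []
  let name_lower := if name == "" then "" else PySem.Str.lower name
  let bp_lower := if body_part == "" then "" else PySem.Str.lower body_part
  let knee_stress := ["squat", "lunge", "leg press", "leg extension", "jump", "step-up", "pistol"]
  let avoids := if knee_stress.any (fun kw => PySem.Str.isIn kw name_lower)
                   || ["quadriceps", "glutes"].contains bp_lower
                then avoids ++ ["Stresses Knees"] else avoids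
  let back_stress := ["deadlift", "bent over", "good morning", "hyperextension", "row", "clean", "snatch"]
  let avoids := if back_stress.any (fun kw => PySem.Str.isIn kw name_lower)
                then avoids ++ ["Stresses Lower Back"] else avoids
  let shoulder_stress := ["overhead", "press", "raise", "pull-up", "dip", "push-up", "fly"]
  let avoids := if shoulder_stress.any (fun kw => PySem.Str.isIn kw name_lower)
                   || bp_lower == "shoulders"
                then avoids ++ ["Stresses Shoulders"] else avoids
  let wrist_stress := ["push-up", "plank", "handstand", "front rack", "wrist"]
  let avoids := if wrist_stress.any (fun kw => PySem.Str.isIn kw name_lower)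
                then avoids ++ ["Stresses Wrists"] else avoids
  let high_impact := ["jump", "burpee", "box jump", "plyometric", "sprint", "running"]
  let avoids := if high_impact.any (fun kw => PySem.Str.isIn kw name_lower)
                then avoids ++ ["High Impact"] else avoids
  avoids

-- ===== PORT B =====
def pvKwIndex : List (String × String) :=
  [ ("squat", "Stresses Knees"), ("lunge", "Stresses Knees"),
    ("leg press", "Stresses Knees"), ("leg extension", "Stresses Knees"),
    ("jump", "Stresses Knees"), ("step-up", "Stresses Knees"),
    ("pistol", "Stresses Knees"),
    ("deadlift", "Stresses Lower Back"), ("bent over", "Stresses Lower Back"),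
    ("good morning", "Stresses Lower Back"), ("hyperextension", "Stresses Lower Back"),
    ("row", "Stresses Lower Back"), ("clean", "Stresses Lower Back"),
    ("snatch", "Stresses Lower Back"),
    ("overhead", "Stresses Shoulders"), ("press", "Stresses Shoulders"),
    ("raise", "Stresses Shoulders"), ("pull-up", "Stresses Shoulders"),
    ("dip", "Stresses Shoulders"), ("push-up", "Stresses Shoulders"),
    ("fly", "Stresses Shoulders"),
    ("push-up", "Stresses Wrists"), ("plank", "Stresses Wrists"),
    ("handstand", "Stresses Wrists"), ("front rack", "Stresses Wrists"),
    ("wrist", "Stresses Wrists"),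
    ("jump", "High Impact"), ("burpee", "High Impact"), ("box jump", "High Impact"),
    ("plyometric", "High Impact"), ("sprint", "High Impact"), ("running", "High Impact") ]

def pvBpIndex : List (String × String) :=
  [ ("quadriceps", "Stresses Knees"), ("glutes", "Stresses Knees"),
    ("shoulders", "Stresses Shoulders") ]

def pvOrder : List String :=
  ["Stresses Knees", "Stresses Lower Back", "Stresses Shoulders", "Stresses Wrists", "High Impact"]

def derive_avoids_alt (name : String) (body_part : String) (equipment : String) : List String :=
  let nl := PySem.Str.lower name
  let bl := PySem.Str.lower body_part
  let hit : PySem.Set String :=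
    PySem.Set.ofList ((pvKwIndex.filter (fun p => PySem.Str.isIn p.1 nl)).map Prod.snd)
  let hit := PySem.Set.update hit ((pvBpIndex.filter (fun p => p.1 == bl)).map Prod.snd)
  pvOrder.filter (fun lab => PySem.Set.contains hit lab)

-- ===== PRECONDITION & SPEC =====
def Spec_derive_avoids (name : String) (body_part : String) (equipment : String) (out : List String) : Prop := out = derive_avoids_alt name body_part equipment
instance (name : String) (body_part : String) (equipment : String) (out : List String) : Decidable (Spec_derive_avoids name body_part equipment out) := by unfold Spec_derive_avoids; infer_instance

-- ===== CLAIM (what is proved, stated in full; the proofs are below) =====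
def Claim_equal_derive_avoids : Prop := ∀ (name : String) (body_part : String) (equipment : String), Dom_derive_avoids name body_part equipment → Spec_derive_avoids name body_part equipment (derive_avoids name body_part equipment)

-- ===== LEMMAS AND PROOFS =====

-- Python's `s.lower() if s else ""` equals `s.lower()` because lower("") = "".
theorem lower_if_empty (s : String) :
    (if s == "" then "" else PySem.Str.lower s) = PySem.Str.lower s := by
  by_cases h : s = ""
  · subst h; decide
  · simp [h]

-- membership in PySem.Set.update s xs
theorem mem_set_update {α : Type} [BEq α] [LawfulBEq α] (s : PySem.Set α) (xs : List α) (y : α) :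
    y ∈ PySem.Set.update s xs ↔ y ∈ s ∨ y ∈ xs := by
  unfold PySem.Set.update
  induction xs generalizing s with
  | nil => simp
  | cons a t ih => simp [List.foldl_cons, ih, PySem.Set.mem_add]; tauto

-- membership test of B's hit set, reduced to the two underlying lists
theorem set_contains_update_ofList (A Bp : List String) (lab : String) :
    PySem.Set.contains (PySem.Set.update (PySem.Set.ofList A) Bp) lab
    = (A.contains lab || Bp.contains lab) := by
  rw [Bool.eq_iff_iff]
  simp only [PySem.Set.contains, List.contains_iff_mem, mem_set_update,
    PySem.Set.mem_ofList, Bool.or_eq_true]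

-- membership in the filtered, projected index as a single `any` over the index
theorem contains_filter_map {α β : Type} [BEq β] [LawfulBEq β]
    (l : List (α × β)) (p : α × β → Bool) (a : β) :
    ((l.filter p).map Prod.snd).contains a = l.any (fun x => p x && x.2 == a) := by
  rw [Bool.eq_iff_iff]
  simp [List.mem_filter]

theorem hit_knees (nl bl : String) :
    (pvKwIndex.any (fun x => PySem.Str.isIn x.1 nl && x.2 == "Stresses Knees")
       || pvBpIndex.any (fun x => (x.1 == bl) && x.2 == "Stresses Knees"))
    = (["squat", "lunge", "leg press", "leg extension", "jump", "step-up", "pistol"].any (fun kw => PySem.Str.isIn kw nl)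
       || ["quadriceps", "glutes"].contains bl) := by
  simp only [pvKwIndex, pvBpIndex, List.any_cons, List.any_nil, List.contains_cons,
    List.contains_nil, beq_self_eq_true, Bool.and_true, Bool.and_false, Bool.or_false,
    Bool.false_or, BEq.comm (a := bl),
    show (("Stresses Lower Back" : String) == "Stresses Knees") = false from by decide,
    show (("Stresses Shoulders" : String) == "Stresses Knees") = false from by decide,
    show (("Stresses Wrists" : String) == "Stresses Knees") = false from by decide,
    show (("High Impact" : String) == "Stresses Knees") = false from by decide]

theorem hit_back (nl bl : String) :
    (pvKwIndex.any (fun x => PySem.Str.isIn x.1 nl && x.2 == "Stresses Lower Back")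
       || pvBpIndex.any (fun x => (x.1 == bl) && x.2 == "Stresses Lower Back"))
    = (["deadlift", "bent over", "good morning", "hyperextension", "row", "clean", "snatch"].any (fun kw => PySem.Str.isIn kw nl)) := by
  simp only [pvKwIndex, pvBpIndex, List.any_cons, List.any_nil, List.contains_cons,
    List.contains_nil, beq_self_eq_true, Bool.and_true, Bool.and_false, Bool.or_false,
    Bool.false_or, BEq.comm (a := bl),
    show (("Stresses Knees" : String) == "Stresses Lower Back") = false from by decide,
    show (("Stresses Shoulders" : String) == "Stresses Lower Back") = false from by decide,
    show (("Stresses Wrists" : String) == "Stresses Lower Back") = false from by decide,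
    show (("High Impact" : String) == "Stresses Lower Back") = false from by decide]

theorem hit_shoulders (nl bl : String) :
    (pvKwIndex.any (fun x => PySem.Str.isIn x.1 nl && x.2 == "Stresses Shoulders")
       || pvBpIndex.any (fun x => (x.1 == bl) && x.2 == "Stresses Shoulders"))
    = (["overhead", "press", "raise", "pull-up", "dip", "push-up", "fly"].any (fun kw => PySem.Str.isIn kw nl)
       || bl == "shoulders") := by
  simp only [pvKwIndex, pvBpIndex, List.any_cons, List.any_nil, List.contains_cons,
    List.contains_nil, beq_self_eq_true, Bool.and_true, Bool.and_false, Bool.or_false,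
    Bool.false_or, BEq.comm (a := bl),
    show (("Stresses Knees" : String) == "Stresses Shoulders") = false from by decide,
    show (("Stresses Lower Back" : String) == "Stresses Shoulders") = false from by decide,
    show (("Stresses Wrists" : String) == "Stresses Shoulders") = false from by decide,
    show (("High Impact" : String) == "Stresses Shoulders") = false from by decide]

theorem hit_wrists (nl bl : String) :
    (pvKwIndex.any (fun x => PySem.Str.isIn x.1 nl && x.2 == "Stresses Wrists")
       || pvBpIndex.any (fun x => (x.1 == bl) && x.2 == "Stresses Wrists"))
    = (["push-up", "plank", "handstand", "front rack", "wrist"].any (fun kw => PySem.Str.isIn kw nl)) := by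
  simp only [pvKwIndex, pvBpIndex, List.any_cons, List.any_nil, List.contains_cons,
    List.contains_nil, beq_self_eq_true, Bool.and_true, Bool.and_false, Bool.or_false,
    Bool.false_or, BEq.comm (a := bl),
    show (("Stresses Knees" : String) == "Stresses Wrists") = false from by decide,
    show (("Stresses Lower Back" : String) == "Stresses Wrists") = false from by decide,
    show (("Stresses Shoulders" : String) == "Stresses Wrists") = false from by decide,
    show (("High Impact" : String) == "Stresses Wrists") = false from by decide]

theorem hit_impact (nl bl : String) :
    (pvKwIndex.any (fun x => PySem.Str.isIn x.1 nl && x.2 == "High Impact")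
       || pvBpIndex.any (fun x => (x.1 == bl) && x.2 == "High Impact"))
    = (["jump", "burpee", "box jump", "plyometric", "sprint", "running"].any (fun kw => PySem.Str.isIn kw nl)) := by
  simp only [pvKwIndex, pvBpIndex, List.any_cons, List.any_nil, List.contains_cons,
    List.contains_nil, beq_self_eq_true, Bool.and_true, Bool.and_false, Bool.or_false,
    Bool.false_or, BEq.comm (a := bl),
    show (("Stresses Knees" : String) == "High Impact") = false from by decide,
    show (("Stresses Lower Back" : String) == "High Impact") = false from by decide,
    show (("Stresses Shoulders" : String) == "High Impact") = false from by decide,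
    show (("Stresses Wrists" : String) == "High Impact") = false from by decide]

-- ===== VERDICT (by name: the statement is the Claim_ definition above) =====
theorem derive_avoids_spec : Claim_equal_derive_avoids := by
  intro name body_part equipment _
  unfold Spec_derive_avoids derive_avoids derive_avoids_alt
  rw [lower_if_empty, lower_if_empty]
  generalize PySem.Str.lower name = nl
  generalize PySem.Str.lower body_part = bl
  simp only [pvOrder, List.filter_cons, List.filter_nil, set_contains_update_ofList,
    contains_filter_map, hit_knees, hit_back, hit_shoulders, hit_wrists, hit_impact]
  generalize h1 : List.any _ (fun kw => PySem.Str.isIn kw nl) = g1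
  generalize h2 : List.contains _ bl = g2
  generalize h3 : List.any _ (fun kw => PySem.Str.isIn kw nl) = g3
  generalize h4 : List.any _ (fun kw => PySem.Str.isIn kw nl) = g4
  generalize h5 : (bl == "shoulders") = g5
  generalize h6 : List.any _ (fun kw => PySem.Str.isIn kw nl) = g6
  generalize h7 : List.any _ (fun kw => PySem.Str.isIn kw nl) = g7
  cases g1 <;> cases g2 <;> cases g3 <;> cases g4 <;> cases g5 <;> cases g6 <;> cases g7 <;> rfl
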